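-- pv_equiv track=rewrite | github.com/WorldofKerry/ToHDL | tests/integration/functions.py | multi_funcs
-- ===== SOURCE A (Python) =====
-- def p2vrange(start: int, stop: int, step: int) -> int:
--     """
--     Simplified version of Python's built-in range function
--     """
--     while start < stop:
--         yield start
--         start += step
--
-- def multiplier(multiplicand: int, multiplier: int) -> int:
--     product = 0
--     while multiplier > 0:
--         product += multiplicand
--         multiplier -= 1
--     return product
--
-- def multi_funcs(a, b):
--     """
--     Testing multiple function calls and tested function calls
--     """
--     temp = multiplier(a, b)
--     yield temp
--     temp = multiplier(a + 10, b)
--     yield temp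
--     for i in p2vrange(0, 2, 1):
--         yield i
--     for i in p2vrange(0, 2, 1):
--         yield i
--     for i in p2vrange(0, 2, 1):
--         yield i
--         for i in p2vrange(0, 2, 1):
--             yield i
-- ===== SOURCE B (Python) =====
-- def multi_funcs(a, b):
--     # O(1): closed-form product instead of repeated addition, fixed tail emitted directly
--     m = a * b if b > 0 else 0
--     yield m
--     yield m + (10 * b if b > 0 else 0)
--     yield from (0, 1, 0, 1, 0, 0, 1, 1, 0, 1)
-- ===== Notes on version B (the rewrite author's own statement) =====
-- stated objective: faster
-- what changed: Replaces the O(b) repeated-addition multiplier loop and the three p2vrange loops with a closed-form product (a*b when b>0 else 0) and a directly emitted constant tail.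
import Mathlib
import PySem

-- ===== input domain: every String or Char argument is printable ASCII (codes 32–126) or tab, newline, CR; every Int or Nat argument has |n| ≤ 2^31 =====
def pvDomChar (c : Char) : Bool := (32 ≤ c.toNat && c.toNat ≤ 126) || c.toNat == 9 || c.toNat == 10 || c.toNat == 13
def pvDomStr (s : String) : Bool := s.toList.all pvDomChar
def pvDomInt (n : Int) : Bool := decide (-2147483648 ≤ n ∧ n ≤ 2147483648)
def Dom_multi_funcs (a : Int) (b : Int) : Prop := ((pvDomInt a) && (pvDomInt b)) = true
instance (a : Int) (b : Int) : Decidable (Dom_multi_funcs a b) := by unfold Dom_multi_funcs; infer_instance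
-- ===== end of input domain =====

-- B replaces A's O(b) repeated-addition multiplier loop and fixed small loops with a
-- closed-form product and a directly emitted constant tail (objective: faster, O(1)).

-- ===== PORT A =====
-- while multiplier > 0: product += multiplicand; multiplier -= 1
def multiplierLoop (multiplicand : Int) (multiplier : Int) (product : Int) : Int :=
  if multiplier > 0 then multiplierLoop multiplicand (multiplier - 1) (product + multiplicand)
  else product
termination_by multiplier.toNat
decreasing_by omega

def multiplierA (multiplicand : Int) (multiplier : Int) : Int :=
  multiplierLoop multiplicand multiplier 0

-- while start < stop: yield start; start += step   (collected as a list)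
def p2vrange (start : Int) (stop : Int) (step : Int) : List Int :=
  if h : start < stop ∧ step > 0 then start :: p2vrange (start + step) stop step
  else if start < stop then []   -- step ≤ 0: Python's loop would not terminate; A is only called with step = 1
  else []
termination_by (stop - start).toNat
decreasing_by omega

def multi_funcs (a : Int) (b : Int) : List Int :=
  let temp1 := multiplierA a b
  let temp2 := multiplierA (a + 10) b
  temp1 :: temp2 ::
    (p2vrange 0 2 1 ++ p2vrange 0 2 1 ++
      (p2vrange 0 2 1).flatMap (fun i => i :: p2vrange 0 2 1))

-- ===== PORT B =====
def multi_funcs_alt (a : Int) (b : Int) : List Int :=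
  let m := if b > 0 then a * b else 0
  m :: (m + (if b > 0 then 10 * b else 0)) :: [0, 1, 0, 1, 0, 0, 1, 1, 0, 1]

-- ===== PRECONDITION & SPEC =====
def Spec_multi_funcs (a : Int) (b : Int) (out : List Int) : Prop := out = multi_funcs_alt a b
instance (a : Int) (b : Int) (out : List Int) : Decidable (Spec_multi_funcs a b out) := by unfold Spec_multi_funcs; infer_instance

-- ===== CLAIM =====
def Claim_equal_multi_funcs : Prop := ∀ (a : Int) (b : Int), Dom_multi_funcs a b → Spec_multi_funcs a b (multi_funcs a b)

-- ===== LEMMAS AND PROOFS =====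
theorem multiplierLoop_eq (m : Int) (k : Int) (p : Int) :
    multiplierLoop m k p = p + (if k > 0 then m * k else 0) := by
  by_cases h : k > 0
  · have hn : k.toNat ≠ 0 := by omega
    rw [multiplierLoop]
    simp only [h, if_pos]
    have ih := multiplierLoop_eq m (k - 1) (p + m)
    rw [ih]
    by_cases h1 : k - 1 > 0
    · simp only [h1, if_pos]; ring
    · have hk : k = 1 := by omega
      simp [hk]
  · rw [multiplierLoop]; simp [h]
termination_by k.toNat
decreasing_by omega

theorem multiplierA_eq (m k : Int) :
    multiplierA m k = if k > 0 then m * k else 0 := by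
  unfold multiplierA; rw [multiplierLoop_eq]; simp

theorem p2vrange_02 : p2vrange 0 2 1 = [0, 1] := by
  rw [p2vrange]; norm_num
  rw [p2vrange]; norm_num
  rw [p2vrange]; norm_num

-- ===== VERDICT =====
theorem multi_funcs_spec : Claim_equal_multi_funcs := by
  intro a b _
  unfold Spec_multi_funcs multi_funcs multi_funcs_alt
  rw [multiplierA_eq, multiplierA_eq, p2vrange_02]
  by_cases h : b > 0 <;> (simp [h, List.flatMap]; try ring)
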